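-- pv_equiv track=rewrite | github.com/1067147135/Repository | Internship/Google Patent Crawler Script - Python&Selenium&Requests&Clickhouse&Mysql&Multiprocessing&Threading/step5_replenish.py | generate_chunks
-- ===== SOURCE A (Python) =====
-- def generate_chunks(n, k):
--     chunk_size = n // k
--     r = n % k
--     chunks = []
--     start = 0
--     end = 0
--     for i in range(r):
--         start = end
--         end += chunk_size + 1
--         chunks.append((start, end))
--     for i in range(r, k):
--         start = end
--         end += chunk_size
--         chunks.append((start, end))
--     return chunks
-- ===== SOURCE B (Python) =====
-- def generate_chunks(n, k):
--     chunk_size = n // k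
--     r = n % k
--     return [(i * chunk_size + min(i, r), (i + 1) * chunk_size + min(i + 1, r))
--             for i in range(k)]
-- ===== Notes on version B (the rewrite author's own statement) =====
-- stated objective: simpler
-- what changed: B computes each chunk's (start, end) in closed form from its index in a single list comprehension over range(k), replacing A's two sequential loops with a mutable running end accumulator.
import Mathlib
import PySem

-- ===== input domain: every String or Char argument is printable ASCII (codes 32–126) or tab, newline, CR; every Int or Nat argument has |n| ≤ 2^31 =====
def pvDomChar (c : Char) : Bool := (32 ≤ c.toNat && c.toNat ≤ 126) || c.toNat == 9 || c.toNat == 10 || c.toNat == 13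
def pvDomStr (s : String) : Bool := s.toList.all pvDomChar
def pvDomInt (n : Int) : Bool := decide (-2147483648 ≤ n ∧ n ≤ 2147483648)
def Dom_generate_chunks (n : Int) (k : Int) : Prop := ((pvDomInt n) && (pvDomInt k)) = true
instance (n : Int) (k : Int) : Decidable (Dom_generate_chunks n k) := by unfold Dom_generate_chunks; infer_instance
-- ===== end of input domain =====

-- B computes each chunk's boundaries in closed form from its index (one map over range(k)),
-- replacing A's two sequential loops and running `end` accumulator; objective: simpler.

-- ===== PORT A =====
-- state: (start, end, chunks), threaded through both loops exactly as in A
def generate_chunks (n : Int) (k : Int) : List (Int × Int) :=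
  let chunk_size := PySem.Int.floordiv n k
  let r := PySem.Int.mod n k
  let s1 := (PySem.List.pyRange 0 r 1).foldl
    (fun (st : Int × Int × List (Int × Int)) _ =>
      (st.2.1, st.2.1 + (chunk_size + 1), st.2.2 ++ [(st.2.1, st.2.1 + (chunk_size + 1))]))
    (0, 0, [])
  let s2 := (PySem.List.pyRange r k 1).foldl
    (fun (st : Int × Int × List (Int × Int)) _ =>
      (st.2.1, st.2.1 + chunk_size, st.2.2 ++ [(st.2.1, st.2.1 + chunk_size)]))
    s1
  s2.2.2

-- ===== PORT B =====
def generate_chunks_alt (n : Int) (k : Int) : List (Int × Int) :=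
  let chunk_size := PySem.Int.floordiv n k
  let r := PySem.Int.mod n k
  (PySem.List.pyRange 0 k 1).map
    (fun i => (i * chunk_size + min i r, (i + 1) * chunk_size + min (i + 1) r))

-- ===== PRECONDITION & SPEC =====
-- A raises ZeroDivisionError when k = 0; Pre_ excludes exactly that.
def Pre_generate_chunks (n : Int) (k : Int) : Prop := k ≠ 0
instance (n : Int) (k : Int) : Decidable (Pre_generate_chunks n k) := by unfold Pre_generate_chunks; infer_instance
def pvWitness_generate_chunks : Int × Int := (10, 3)
def Spec_generate_chunks (n : Int) (k : Int) (out : List (Int × Int)) : Prop := out = generate_chunks_alt n k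
instance (n : Int) (k : Int) (out : List (Int × Int)) : Decidable (Spec_generate_chunks n k out) := by unfold Spec_generate_chunks; infer_instance

-- ===== CLAIM (what is proved, stated in full; the proofs are below) =====
def Claim_equal_generate_chunks : Prop := ∀ (n : Int) (k : Int), Dom_generate_chunks n k → Pre_generate_chunks n k → Spec_generate_chunks n k (generate_chunks n k)

-- ===== LEMMAS AND PROOFS =====

-- the second/third components of A's loop state after folding an arbitrary list with
-- constant increment `inc`: the running end advances by inc per step and the appended
-- chunks form an arithmetic sequence
lemma pv_loop_spec (inc : Int) (l : List Int) :
    ∀ (st : Int × Int × List (Int × Int)),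
      ((l.foldl
        (fun (st : Int × Int × List (Int × Int)) _ =>
          (st.2.1, st.2.1 + inc, st.2.2 ++ [(st.2.1, st.2.1 + inc)]))
        st).2)
      = (st.2.1 + l.length * inc,
         st.2.2 ++ (List.range l.length).map
           (fun (j : Nat) => (st.2.1 + (j : Int) * inc, st.2.1 + ((j : Int) + 1) * inc))) := by
  induction l with
  | nil => simp
  | cons x l ih =>
      intro st
      rw [List.foldl_cons, ih]
      dsimp only
      refine Prod.ext ?_ ?_
      · simp; ring
      · simp only [List.length_cons, List.range_succ_eq_map, List.map_cons, List.map_map]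
        simp only [List.append_assoc, List.cons_append, List.nil_append]
        refine congrArg (st.2.2 ++ ·) ?_
        rw [List.cons.injEq]
        refine ⟨?_, List.map_congr_left ?_⟩
        · refine Prod.ext ?_ ?_ <;> simp
        · intro j _
          simp [Function.comp]
          constructor <;> push_cast <;> ring_nf

lemma pv_mod_eq_fmod (n k : Int) : PySem.Int.mod n k = Int.fmod n k := by
  simp [PySem.Int.mod]

lemma pv_mod_bounds (n : Int) {k : Int} (hk : k ≠ 0) :
    (0 < k → 0 ≤ PySem.Int.mod n k ∧ PySem.Int.mod n k < k) ∧
    (k < 0 → k < PySem.Int.mod n k ∧ PySem.Int.mod n k ≤ 0) := by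
  have hb1 : 0 ≤ n % k := Int.emod_nonneg n hk
  have hb2 : n % k < |k| := by
    rcases lt_or_gt_of_ne hk with h | h
    · have he : n % k = n % (-k) := (Int.emod_neg n k).symm
      rw [he, abs_of_neg h]
      exact Int.emod_lt_of_pos n (by omega)
    · rw [abs_of_pos h]
      exact Int.emod_lt_of_pos n h
  rw [pv_mod_eq_fmod n k, Int.fmod_eq_emod]
  by_cases hd : k ∣ n
  · have h0 : n % k = 0 := Int.emod_eq_zero_of_dvd hd
    simp only [hd, or_true, if_pos]
    omega
  · have hne : n % k ≠ 0 := fun h0 => hd (Int.dvd_of_emod_eq_zero h0)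
    split_ifs with h
    · have h' : 0 ≤ k := h.resolve_right hd
      rw [abs_of_nonneg h'] at hb2
      omega
    · have h' : ¬ 0 ≤ k := fun hh => h (Or.inl hh)
      rw [abs_of_neg (by omega)] at hb2
      omega

-- ===== VERDICT (by name: the statement is the Claim_ definition above) =====
theorem generate_chunks_spec : Claim_equal_generate_chunks := by
  intro n k _ hk
  unfold Spec_generate_chunks
  simp only [generate_chunks, generate_chunks_alt]
  have hb := pv_mod_bounds n hk
  set cs := PySem.Int.floordiv n k with hcs
  set r := PySem.Int.mod n k with hr
  rcases lt_or_gt_of_ne (show k ≠ 0 from hk) with hneg | hpos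
  · -- k < 0: all three ranges are empty
    obtain ⟨h1, h2⟩ := hb.2 hneg
    rw [PySem.List.pyRange_one_eq_nil (a := 0) (b := r) (by omega),
        PySem.List.pyRange_one_eq_nil (a := r) (b := k) (by omega),
        PySem.List.pyRange_one_eq_nil (a := 0) (b := k) (by omega)]
    simp
  · -- k > 0: 0 ≤ r < k
    obtain ⟨hr0, hrk⟩ := hb.1 hpos
    rw [pv_loop_spec]
    dsimp only
    rw [pv_loop_spec]
    dsimp only
    rw [PySem.List.pyRange_one_append 0 r k (by omega) (by omega), List.map_append]
    simp only [PySem.List.length_pyRange_one, List.nil_append, zero_add]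
    have he0 : ((r - 0).toNat : Int) = r := by omega
    refine congrArg₂ (· ++ ·) ?_ ?_
    · rw [PySem.List.pyRange_one]
      simp only [List.map_map]
      refine List.map_congr_left ?_
      intro j hj
      rw [List.mem_range] at hj
      have hjr : (j : Int) < r := by omega
      simp only [Function.comp_apply]
      have hm1 : min (0 + (j : Int)) r = 0 + (j : Int) := min_eq_left (by omega)
      have hm2 : min (0 + (j : Int) + 1) r = 0 + (j : Int) + 1 := min_eq_left (by omega)
      rw [hm1, hm2]
      refine Prod.ext ?_ ?_ <;> simp <;> ring
    · rw [PySem.List.pyRange_one]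
      simp only [List.map_map]
      refine List.map_congr_left ?_
      intro j hj
      rw [List.mem_range] at hj
      have hjk : (j : Int) < k - r := by omega
      simp only [Function.comp_apply]
      have hm1 : min (r + (j : Int)) r = r := min_eq_right (by omega)
      have hm2 : min (r + (j : Int) + 1) r = r := min_eq_right (by omega)
      rw [hm1, hm2, he0]
      refine Prod.ext ?_ ?_ <;> simp <;> ring
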